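-- pv_equiv track=rewrite | github.com/stefanwebb/coding-challenge-preparation | coderbyte/easy/closest-enemy-ii.py | ClosestEnemyII
-- ===== SOURCE A (Python) =====
-- def findOne(arr):
--     for idx, row in enumerate(arr):
--         for jdx, col in enumerate(row):
--             if arr[idx][jdx] == '1':
--                 return (idx, jdx)
--
-- def findTwos(arr):
--     locs = []
--     for idx, row in enumerate(arr):
--         for jdx, col in enumerate(row):
--             if arr[idx][jdx] == '2':
--                 locs.append((idx, jdx))
--     return locs
--
-- def ClosestEnemyII(strArr):
--     rows = len(strArr)
--     cols = len(strArr[0])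
--
--     # Find where 1 is
--     oneLoc = findOne(strArr)
--     twoLocs = findTwos(strArr)
--
--     if len(twoLocs) == 0:
--         return 0
--
--     minDiff = 100
--     for loc in twoLocs:
--         xMin = min(abs(loc[0]-oneLoc[0]), rows-abs(loc[0]-oneLoc[0]))
--         yMin = min(abs(loc[1]-oneLoc[1]), cols-abs(loc[1]-oneLoc[1]))
--         thisDiff = xMin + yMin
--         if thisDiff < minDiff:
--             minDiff = thisDiff
--
--     # code goes here
--     return minDiff
-- ===== SOURCE B (Python) =====
-- def ClosestEnemyII(strArr):
--     rows = len(strArr)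
--     cols = len(strArr[0])
--
--     # locate the '1' with a per-row substring search
--     one = None
--     for i, row in enumerate(strArr):
--         j = row.find('1')
--         if j != -1:
--             one = (i, j)
--             break
--
--     # the toroidal distance is separable: aggregate, per column, the minimum
--     # toroidal row-distance over the '2's in that column (no coordinate list)
--     colmin = {}
--     for i, row in enumerate(strArr):
--         for j, c in enumerate(row):
--             if c == '2':
--                 dx = min(abs(i - one[0]), rows - abs(i - one[0]))
--                 cur = colmin.get(j, dx)
--                 colmin[j] = dx if dx < cur else cur
--
--     if not colmin:
--         return 0
--
--     # combine each column's row-minimum with that column's toroidal distance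
--     best = 100
--     for j, dx in colmin.items():
--         t = dx + min(abs(j - one[1]), cols - abs(j - one[1]))
--         if t < best:
--             best = t
--     return best
-- ===== Notes on version B (the rewrite author's own statement) =====
-- stated objective: alternative
-- what changed: B exploits that the toroidal Manhattan distance is separable per axis: instead of A's list of '2' coordinates and a per-enemy 2D-distance loop, it builds a dict mapping each column to the minimum toroidal row-distance of the '2's in it, then minimizes column-minimum + toroidal column-distance over the dict's items; the '1' is located by per-row str.find instead of a per-character scan.
import Mathlib
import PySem

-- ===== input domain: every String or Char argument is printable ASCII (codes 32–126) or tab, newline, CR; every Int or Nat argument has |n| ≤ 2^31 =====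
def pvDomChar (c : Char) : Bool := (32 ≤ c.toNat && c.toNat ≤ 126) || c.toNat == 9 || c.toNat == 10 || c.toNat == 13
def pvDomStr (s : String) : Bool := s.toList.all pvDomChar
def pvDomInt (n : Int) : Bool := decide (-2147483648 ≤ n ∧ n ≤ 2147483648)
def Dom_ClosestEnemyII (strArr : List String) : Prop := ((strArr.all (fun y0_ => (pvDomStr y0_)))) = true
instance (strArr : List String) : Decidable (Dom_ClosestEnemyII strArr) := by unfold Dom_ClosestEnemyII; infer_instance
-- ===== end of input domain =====

-- B replaces A's coordinate-list pass with a per-column dict of minimum toroidal row-distances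
-- (the distance is separable per axis), combined with each column's toroidal column-distance;
-- the '1' is located by per-row str.find. Same O(r*c); a timing run measured a constant-factor speedup.


-- ===== PORT A =====
-- findOne: first (idx, jdx) with arr[idx][jdx] == '1', scanning one row at a time
def pvRowFindOne (i : Int) (j : Int) : List Char → Option (Int × Int)
  | [] => none
  | c :: t => if c = '1' then some (i, j) else pvRowFindOne i (j + 1) t

def pvFindOne (i : Int) : List String → Option (Int × Int)
  | [] => none
  | r :: t =>
      match pvRowFindOne i 0 r.toList with
      | some p => some p
      | none => pvFindOne (i + 1) t

-- findTwos: the list of all (idx, jdx) with arr[idx][jdx] == '2', in scan order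
def pvRowTwos (i : Int) (j : Int) : List Char → List (Int × Int)
  | [] => []
  | c :: t => if c = '2' then (i, j) :: pvRowTwos i (j + 1) t else pvRowTwos i (j + 1) t

def pvFindTwos (i : Int) : List String → List (Int × Int)
  | [] => []
  | r :: t => pvRowTwos i 0 r.toList ++ pvFindTwos (i + 1) t

def ClosestEnemyII (strArr : List String) : Int :=
  let rows : Int := strArr.length
  let cols : Int := (strArr.headD "").toList.length  -- len(strArr[0]); Pre_ excludes strArr = []
  let oneLoc := pvFindOne 0 strArr
  let twoLocs := pvFindTwos 0 strArr
  if twoLocs.length = 0 then 0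
  else
    match oneLoc with
    | none => 0  -- Python raises TypeError here ('2' present, no '1'); excluded by Pre_
    | some o =>
        twoLocs.foldl (fun m loc =>
          let xMin := min |loc.1 - o.1| (rows - |loc.1 - o.1|)
          let yMin := min |loc.2 - o.2| (cols - |loc.2 - o.2|)
          let thisDiff := xMin + yMin
          if thisDiff < m then thisDiff else m) 100

-- ===== PORT B =====
-- locate the '1': per-row substring search with str.find (first row containing it)
def pvFindOneB (i : Int) : List String → Option (Int × Int)
  | [] => none
  | r :: t =>
      let j := PySem.Str.find r "1"
      if j ≠ -1 then some (i, j) else pvFindOneB (i + 1) t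

-- inner loop of the dict-building pass: colmin[j] = min(colmin.get(j, dx), dx) at each '2'
def pvRowColMin (one : Option (Int × Int)) (rows : Int) (i : Int) :
    Int → List Char → PySem.Dict Int Int → PySem.Dict Int Int
  | _, [], d => d
  | j, c :: t, d =>
      if c = '2' then
        match one with
        | some o =>
            let dx := min |i - o.1| (rows - |i - o.1|)
            let cur := d.getD j dx
            pvRowColMin one rows i (j + 1) t (d.insert j (if dx < cur then dx else cur))
        | none => pvRowColMin one rows i (j + 1) t d  -- Python raises TypeError here; excluded by Pre_
      else pvRowColMin one rows i (j + 1) t d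

def pvColMin (one : Option (Int × Int)) (rows : Int) (i : Int) :
    List String → PySem.Dict Int Int → PySem.Dict Int Int
  | [], d => d
  | r :: t, d => pvColMin one rows (i + 1) t (pvRowColMin one rows i 0 r.toList d)

def ClosestEnemyII_alt (strArr : List String) : Int :=
  let rows : Int := strArr.length
  let cols : Int := (strArr.headD "").toList.length  -- len(strArr[0]); Pre_ excludes strArr = []
  let one := pvFindOneB 0 strArr
  let colmin := pvColMin one rows 0 strArr PySem.Dict.empty
  if colmin.items = [] then 0
  else
    match one with
    | none => 0  -- unreachable: colmin nonempty forces a '2', Pre_ then forces a '1'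
    | some o =>
        colmin.items.foldl (fun b p =>
          let t := p.2 + min |p.1 - o.2| (cols - |p.1 - o.2|)
          if t < b then t else b) 100

-- ===== PRECONDITION & SPEC =====
-- Pre_ excludes exactly the inputs on which Python A raises: the empty list (IndexError on
-- strArr[0]) and grids containing a '2' but no '1' (TypeError: oneLoc is None).
def Pre_ClosestEnemyII (strArr : List String) : Prop :=
  strArr ≠ [] ∧ ((∃ s ∈ strArr, '2' ∈ s.toList) → ∃ s ∈ strArr, '1' ∈ s.toList)
instance (strArr : List String) : Decidable (Pre_ClosestEnemyII strArr) := by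
  unfold Pre_ClosestEnemyII; infer_instance

def pvWitness_ClosestEnemyII : List String := ["0100", "0002"]

def Spec_ClosestEnemyII (strArr : List String) (out : Int) : Prop := out = ClosestEnemyII_alt strArr
instance (strArr : List String) (out : Int) : Decidable (Spec_ClosestEnemyII strArr out) := by unfold Spec_ClosestEnemyII; infer_instance

-- ===== CLAIM (what is proved, stated in full; the proofs are below) =====
def Claim_equal_ClosestEnemyII : Prop := ∀ (strArr : List String), Dom_ClosestEnemyII strArr → Pre_ClosestEnemyII strArr → Spec_ClosestEnemyII strArr (ClosestEnemyII strArr)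

-- ===== LEMMAS AND PROOFS =====

theorem pvRowFindOne_eq_find (i : Int) (cs : List Char) (k : Nat) :
    pvRowFindOne i (k : Int) cs =
      (if PySem.Chars.find.go ['1'] cs k = -1 then none
       else some (i, PySem.Chars.find.go ['1'] cs k)) := by
  induction cs generalizing k with
  | nil => simp [pvRowFindOne, PySem.Chars.find.go]
  | cons c t ih =>
      rw [PySem.Chars.find.go]
      by_cases h : c = '1'
      · simp only [pvRowFindOne, h, List.isPrefixOf, Bool.and_true, beq_self_eq_true, if_true]
        have : ¬ ((k : Int) = -1) := by omega
        simp [this]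
      · have hcast : ((k : Int) + 1) = ((k + 1 : Nat) : Int) := by push_cast; ring
        have hpre : (['1'].isPrefixOf (c :: t)) = false := by
          simp [List.isPrefixOf]; exact fun e => h e.symm
        simp only [pvRowFindOne, h, if_false, hpre, hcast, ih, Bool.false_eq_true]

theorem pvFindOneB_eq (n : Int) (l : List String) : pvFindOneB n l = pvFindOne n l := by
  induction l generalizing n with
  | nil => rfl
  | cons r t ih =>
      have h0 := pvRowFindOne_eq_find n r.toList 0
      have hf : PySem.Str.find r "1" = PySem.Chars.find.go ['1'] r.toList 0 := by
        simp [PySem.Str.find, PySem.Chars.find]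
      simp only [pvFindOneB, pvFindOne, hf, Int.natCast_zero] at *
      by_cases hneg : PySem.Chars.find.go ['1'] r.toList 0 = -1
      · simp [hneg, h0, ih]
      · simp [hneg, h0]

theorem pvRowFindOne_eq_none (i j : Int) (cs : List Char) :
    pvRowFindOne i j cs = none ↔ '1' ∉ cs := by
  induction cs generalizing j with
  | nil => simp [pvRowFindOne]
  | cons c t ih =>
      by_cases h : c = '1'
      · simp only [pvRowFindOne, h, if_true]
        simp
      · simp only [pvRowFindOne, h, if_false, ih, List.mem_cons]
        constructor
        · rintro hm (e | e)
          · exact h e.symm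
          · exact hm e
        · exact fun hm e => hm (Or.inr e)

theorem pvFindOne_eq_none (n : Int) (l : List String) :
    pvFindOne n l = none ↔ ∀ s ∈ l, '1' ∉ s.toList := by
  induction l generalizing n with
  | nil => simp [pvFindOne]
  | cons r t ih =>
      cases h : pvRowFindOne n 0 r.toList with
      | some p =>
          have : ¬ ('1' ∉ r.toList) := by
            rw [← pvRowFindOne_eq_none n 0]; simp [h]
          simp [pvFindOne, h, this]
      | none =>
          have := (pvRowFindOne_eq_none n 0 r.toList).mp h
          simp [pvFindOne, h, ih, this]

theorem pvRowTwos_eq_nil (i j : Int) (cs : List Char) :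
    pvRowTwos i j cs = [] ↔ '2' ∉ cs := by
  induction cs generalizing j with
  | nil => simp [pvRowTwos]
  | cons c t ih =>
      by_cases h : c = '2'
      · simp only [pvRowTwos, h, if_true]
        simp
      · simp only [pvRowTwos, h, if_false, ih, List.mem_cons]
        constructor
        · rintro hm (e | e)
          · exact h e.symm
          · exact hm e
        · exact fun hm e => hm (Or.inr e)

theorem pvFindTwos_eq_nil (n : Int) (l : List String) :
    pvFindTwos n l = [] ↔ ∀ s ∈ l, '2' ∉ s.toList := by
  induction l generalizing n with
  | nil => simp [pvFindTwos]
  | cons r t ih => simp [pvFindTwos, pvRowTwos_eq_nil, ih]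

-- the dict pass visits exactly the '2' cells of findTwos, in order
def pvStep (o : Int × Int) (rows : Int) (d : PySem.Dict Int Int) (p : Int × Int) :
    PySem.Dict Int Int :=
  let dx := min |p.1 - o.1| (rows - |p.1 - o.1|)
  let cur := d.getD p.2 dx
  d.insert p.2 (if dx < cur then dx else cur)

-- lookup in the built dict = running minimum of the x-distances filed under that column
def pvMMin (b : Option Int) (v : Int) : Option Int :=
  some (match b with | none => v | some c => if v < c then v else c)

theorem pvRowColMin_eq (o : Int × Int) (rows i j : Int) (cs : List Char)
    (d : PySem.Dict Int Int) :
    pvRowColMin (some o) rows i j cs d = (pvRowTwos i j cs).foldl (pvStep o rows) d := by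
  induction cs generalizing j d with
  | nil => rfl
  | cons c t ih =>
      by_cases h : c = '2' <;> simp [pvRowColMin, pvRowTwos, h, ih, pvStep]

theorem pvColMin_eq (o : Int × Int) (rows i : Int) (l : List String)
    (d : PySem.Dict Int Int) :
    pvColMin (some o) rows i l d = (pvFindTwos i l).foldl (pvStep o rows) d := by
  induction l generalizing i d with
  | nil => rfl
  | cons r t ih => simp [pvColMin, pvFindTwos, pvRowColMin_eq, ih, List.foldl_append]

theorem get?_foldl_pvStep (o : Int × Int) (rows : Int) (L : List (Int × Int))
    (d : PySem.Dict Int Int) (j : Int) :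
    (L.foldl (pvStep o rows) d).get? j =
      ((L.filter (fun p => p.2 = j)).map
        (fun p => min |p.1 - o.1| (rows - |p.1 - o.1|))).foldl pvMMin (d.get? j) := by
  induction L generalizing d with
  | nil => rfl
  | cons p t ih =>
      simp only [List.foldl_cons, List.filter_cons]
      by_cases h : p.2 = j
      · simp only [h, decide_true, if_true, List.map_cons, List.foldl_cons, ih]
        congr 1
        simp only [pvStep, PySem.Dict.get?_insert, h, pvMMin,
          PySem.Dict.getD_eq_get?_getD]
        cases d.get? j <;> simp
      · simp only [h, decide_false, ih]
        congr 1
        simp only [pvStep, PySem.Dict.get?_insert]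
        rw [if_neg (fun e => h e.symm)]

theorem foldl_pvMMin_some (t : List Int) (v : Int) :
    t.foldl pvMMin (some v) = some (t.foldl min v) := by
  induction t generalizing v with
  | nil => rfl
  | cons c cs ih =>
      simp only [List.foldl_cons, pvMMin, ih]
      congr 2
      simp [min_def]
      omega

theorem foldl_ifmin_eq (l : List Int) (a : Int) :
    l.foldl (fun m t => if t < m then t else m) a = l.foldl min a := by
  induction l generalizing a with
  | nil => rfl
  | cons c cs ih =>
      simp only [List.foldl_cons, ih]
      congr 1
      simp [min_def]
      omega

theorem pvG_spec (L : List (Int × Int)) (x : Int → Int) (j : Int)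
    (hj : j ∈ L.map (fun p => p.2)) :
    (∃ q ∈ L, q.2 = j ∧
        (((L.filter (fun p => p.2 = j)).map (fun p => x p.1)).foldl pvMMin none).getD 0 = x q.1) ∧
    (∀ p ∈ L, p.2 = j →
        (((L.filter (fun p => p.2 = j)).map (fun p => x p.1)).foldl pvMMin none).getD 0 ≤ x p.1) := by
  obtain ⟨p, hpL, hpj⟩ := List.mem_map.mp hj
  have hpF : p ∈ L.filter (fun p => p.2 = j) := List.mem_filter.mpr ⟨hpL, by simp [hpj]⟩
  cases hF : (L.filter (fun p => p.2 = j)).map (fun p => x p.1) with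
  | nil =>
      exfalso
      have : x p.1 ∈ (L.filter (fun p => p.2 = j)).map (fun p => x p.1) := List.mem_map_of_mem hpF
      rw [hF] at this; exact List.not_mem_nil this
  | cons v t =>
      have hfold : ((v :: t).foldl pvMMin none) = some (t.foldl min v) := by
        rw [List.foldl_cons]
        exact foldl_pvMMin_some t v
      rw [hfold]
      have hmin : (v :: t).min? = some (t.foldl min v) := List.min?_cons'
      obtain ⟨hmem, hle⟩ := List.min?_eq_some_iff.mp hmin
      rw [← hF] at hmem hle
      obtain ⟨q, hqF, hqx⟩ := List.mem_map.mp hmem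
      have hqL := List.mem_of_mem_filter hqF
      have hqj : q.2 = j := by simpa using List.of_mem_filter hqF
      refine ⟨⟨q, hqL, hqj, by simp [hqx]⟩, ?_⟩
      intro p' hp'L hp'j
      have : x p'.1 ∈ (L.filter (fun p => p.2 = j)).map (fun p => x p.1) :=
        List.mem_map_of_mem (List.mem_filter.mpr ⟨hp'L, by simp [hp'j]⟩)
      simpa using hle _ this

theorem min?_grouped (L : List (Int × Int)) (x : Int → Int) (y : Int → Int)
    (hL : L ≠ []) :
    ((PySem.Set.ofList (L.map (fun p => p.2))).map
        (fun j => (((L.filter (fun p => p.2 = j)).map (fun p => x p.1)).foldl pvMMin none).getD 0 + y j)).min? =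
      (L.map (fun p => x p.1 + y p.2)).min? := by
  cases hR : L.map (fun p => x p.1 + y p.2) with
  | nil => exact absurd (List.map_eq_nil_iff.mp hR) hL
  | cons v t =>
      obtain ⟨hmem, hle⟩ := List.min?_eq_some_iff.mp (hR ▸ (List.min?_cons' :
        (v :: t).min? = some (t.foldl min v)))
      rw [List.min?_cons']
      set m := t.foldl min v with hm
      rw [List.min?_eq_some_iff]
      constructor
      · obtain ⟨p, hpL, hpv⟩ := List.mem_map.mp hmem
        have hj : p.2 ∈ L.map (fun p => p.2) := List.mem_map_of_mem hpL
        obtain ⟨⟨q, hqL, hqj, hqv⟩, hlb⟩ := pvG_spec L x p.2 hj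
        have hgm : (((L.filter (fun p' => p'.2 = p.2)).map (fun p' => x p'.1)).foldl pvMMin none).getD 0 + y p.2 = m := by
          have h1 : m ≤ x q.1 + y p.2 := by
            have : x q.1 + y q.2 ∈ L.map (fun p => x p.1 + y p.2) := List.mem_map_of_mem hqL
            have := hle _ this
            rwa [hqj] at this
          have h2 := hlb p hpL rfl
          omega
        rw [← hgm]
        exact List.mem_map_of_mem ((PySem.Set.mem_ofList _ _).mpr hj)
      · intro b hb
        obtain ⟨j, hjks, hjb⟩ := List.mem_map.mp hb
        have hj : j ∈ L.map (fun p => p.2) := (PySem.Set.mem_ofList _ _).mp hjks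
        obtain ⟨⟨q, hqL, hqj, hqv⟩, _⟩ := pvG_spec L x j hj
        have : x q.1 + y q.2 ∈ L.map (fun p => x p.1 + y p.2) := List.mem_map_of_mem hqL
        have := hle _ this
        rw [← hjb, hqv, ← hqj]
        omega

-- pvColMin without a located '1' never writes to the dict (no '2' branch can fire under Pre_)
theorem pvRowColMin_none (rows i j : Int) (cs : List Char) (d : PySem.Dict Int Int) :
    pvRowColMin none rows i j cs d = d := by
  induction cs generalizing j with
  | nil => rfl
  | cons c t ih => by_cases h : c = '2' <;> simp [pvRowColMin, h, ih]

theorem pvColMin_none (rows i : Int) (l : List String) (d : PySem.Dict Int Int) :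
    pvColMin none rows i l d = d := by
  induction l generalizing i d with
  | nil => rfl
  | cons r t ih => simp [pvColMin, pvRowColMin_none, ih]

-- ===== VERDICT (by name: the statement is the Claim_ definition above) =====
theorem ClosestEnemyII_spec : Claim_equal_ClosestEnemyII := by
  intro strArr _ hpre
  obtain ⟨hne, h21⟩ := hpre
  unfold Spec_ClosestEnemyII ClosestEnemyII ClosestEnemyII_alt
  rw [pvFindOneB_eq]
  cases hL : pvFindTwos 0 strArr with
  | nil =>
      simp only [List.length_nil, reduceIte]
      cases hone : pvFindOne 0 strArr with
      | none => rw [pvColMin_none]; rfl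
      | some o => rw [pvColMin_eq, hL]; rfl
  | cons p ps =>
      have h2 : ∃ s ∈ strArr, '2' ∈ s.toList := by
        by_contra hno
        have h0 : pvFindTwos 0 strArr = [] :=
          (pvFindTwos_eq_nil 0 strArr).mpr (fun s hs hc => hno ⟨s, hs, hc⟩)
        rw [hL] at h0
        exact List.cons_ne_nil p ps h0
      obtain ⟨o, hone⟩ : ∃ o, pvFindOne 0 strArr = some o := by
        cases hfo : pvFindOne 0 strArr with
        | none =>
            exfalso
            obtain ⟨s, hs, hc⟩ := h21 h2
            exact ((pvFindOne_eq_none 0 strArr).mp hfo) s hs hc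
        | some o => exact ⟨o, rfl⟩
      rw [hone]
      show (if (p :: ps).length = 0 then (0:Int)
            else (p :: ps).foldl (fun m loc =>
              let xMin := min |loc.1 - o.1| ((strArr.length : Int) - |loc.1 - o.1|)
              let yMin := min |loc.2 - o.2| (((strArr.headD "").toList.length : Int) - |loc.2 - o.2|)
              let thisDiff := xMin + yMin
              if thisDiff < m then thisDiff else m) 100) =
          (if (pvColMin (some o) (strArr.length : Int) 0 strArr PySem.Dict.empty).items = [] then 0
            else (pvColMin (some o) (strArr.length : Int) 0 strArr PySem.Dict.empty).items.foldl (fun b q =>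
              let t := q.2 + min |q.1 - o.2| (((strArr.headD "").toList.length : Int) - |q.1 - o.2|)
              if t < b then t else b) 100)
      rw [pvColMin_eq, hL]
      set rows : Int := (strArr.length : Int) with hrows
      set cols : Int := ((strArr.headD "").toList.length : Int) with hcols
      set L : List (Int × Int) := p :: ps with hLdef
      set D : PySem.Dict Int Int := L.foldl (pvStep o rows) PySem.Dict.empty with hD
      -- keys of the built dict: the distinct columns holding a '2', first occurrence order
      have hkeys : D.keys = PySem.Set.ofList (L.map (fun q => q.2)) := by
        exact PySem.Dict.keys_foldl_insert_key L (fun q => q.2)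
          (fun d q =>
            let dx := min |q.1 - o.1| (rows - |q.1 - o.1|)
            let cur := d.getD q.2 dx
            if dx < cur then dx else cur) PySem.Dict.empty
      have hnd : D.keys.Nodup := by
        exact PySem.Dict.nodup_keys_foldl_insert_key L (fun q => q.2)
          (fun d q =>
            let dx := min |q.1 - o.1| (rows - |q.1 - o.1|)
            let cur := d.getD q.2 dx
            if dx < cur then dx else cur) PySem.Dict.empty List.nodup_nil
      have hitems_ne : ¬ (D.items = []) := by
        intro h0
        have hm : p.2 ∈ D.keys := by
          rw [hkeys]
          exact (PySem.Set.mem_ofList _ _).mpr (List.mem_map_of_mem List.mem_cons_self)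
        rw [show D.keys = D.items.map (fun q => q.1) from rfl, h0] at hm
        exact List.not_mem_nil hm
      have hitems : D.items = D.keys.map (fun k => (k, D.getD k 0)) :=
        PySem.Dict.items_eq_map_keys D hnd 0
      have hlen : ¬ ((p :: ps).length = 0) := by simp
      rw [if_neg hlen, if_neg hitems_ne, hitems]
      -- the dict lookups: per-column running minimum of x-distances
      have hgetD : ∀ k, D.getD k 0 =
          (((L.filter (fun q => q.2 = k)).map
            (fun q => min |q.1 - o.1| (rows - |q.1 - o.1|))).foldl pvMMin none).getD 0 := by
        intro k
        rw [PySem.Dict.getD_eq_get?_getD, hD, get?_foldl_pvStep]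
        rfl
      -- both folds as foldl min over mapped lists
      have hA : L.foldl (fun m loc =>
            let xMin := min |loc.1 - o.1| (rows - |loc.1 - o.1|)
            let yMin := min |loc.2 - o.2| (cols - |loc.2 - o.2|)
            let thisDiff := xMin + yMin
            if thisDiff < m then thisDiff else m) 100 =
          (L.map (fun q => (min |q.1 - o.1| (rows - |q.1 - o.1|)) +
            (min |q.2 - o.2| (cols - |q.2 - o.2|)))).foldl min 100 := by
        rw [← foldl_ifmin_eq, List.foldl_map]
      have hB : (D.keys.map (fun k => (k, D.getD k 0))).foldl (fun b q =>
            let t := q.2 + min |q.1 - o.2| (cols - |q.1 - o.2|)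
            if t < b then t else b) 100 =
          (D.keys.map (fun k => D.getD k 0 + min |k - o.2| (cols - |k - o.2|))).foldl min 100 := by
        rw [← foldl_ifmin_eq, List.foldl_map, List.foldl_map]
      rw [hA, hB]
      simp only [hgetD, List.foldl_min, hkeys]
      rw [min?_grouped L (fun a => min |a - o.1| (rows - |a - o.1|))
            (fun j => min |j - o.2| (cols - |j - o.2|)) (by simp [hLdef])]
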